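-- pv_equiv track=rewrite | github.com/jtitusj/epub_experiments | src/epub_experiments/gutenberg.py | best_epub_link
-- ===== SOURCE A (Python) =====
-- def best_epub_link(links: dict[str, str]) -> str:
--     preferences = ["epub.images", "epub.noimages", "epub"]
--
--     for pref in preferences:
--         for key, url in links.items():
--             if pref in key:
--                 return url
--
--     for key, url in links.items():
--         if ".epub" in key:
--             return url
--
--     raise ValueError("No EPUB download link found.")
-- ===== SOURCE B (Python) =====
-- def _rank(key, prefs):
--     for i, p in enumerate(prefs):
--         if p in key:
--             return i
--     return len(prefs)
--
--
-- def best_epub_link(links: dict[str, str]) -> str: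
--     prefs = ["epub.images", "epub.noimages", "epub"]
--     best_rank = len(prefs)
--     best_url = None
--     for key, url in links.items():
--         r = _rank(key, prefs)
--         if r < best_rank:
--             best_rank = r
--             best_url = url
--     if best_url is None:
--         raise ValueError("No EPUB download link found.")
--     return best_url
-- ===== Notes on version B (the rewrite author's own statement) =====
-- stated objective: alternative
-- what changed: Replaced A's preference-outer/links-inner nested scan (up to 4 passes over the dict) with a single pass that ranks each key by the first matching preference and keeps the first key of strictly best rank.
import Mathlib
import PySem

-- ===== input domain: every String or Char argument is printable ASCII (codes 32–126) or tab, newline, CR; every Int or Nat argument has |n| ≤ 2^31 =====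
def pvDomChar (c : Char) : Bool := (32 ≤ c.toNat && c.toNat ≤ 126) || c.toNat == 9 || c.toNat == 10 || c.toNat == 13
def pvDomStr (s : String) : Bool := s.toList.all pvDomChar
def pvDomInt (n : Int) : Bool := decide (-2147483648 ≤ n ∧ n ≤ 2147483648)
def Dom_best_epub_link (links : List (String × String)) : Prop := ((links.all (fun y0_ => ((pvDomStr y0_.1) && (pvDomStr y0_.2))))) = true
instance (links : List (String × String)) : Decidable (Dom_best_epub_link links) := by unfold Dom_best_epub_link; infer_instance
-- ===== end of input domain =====

-- B replaces A's preference-outer/links-inner nested scan with one pass that ranks each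
-- key by its first matching preference and keeps the first key of strictly best rank
-- (objective: alternative decomposition, same result).

-- ===== PORT A =====
-- inner loop 'for key, url in links.items(): if pref in key: return url'
def pvScanKey (pref : String) : List (String × String) → Option String
  | [] => none
  | (k, u) :: t => if PySem.Str.isIn pref k then some u else pvScanKey pref t

-- outer loop 'for pref in preferences: …'
def pvOuterLoop : List String → List (String × String) → Option String
  | [], _ => none
  | p :: ps, links =>
    match pvScanKey p links with
    | some u => some u
    | none => pvOuterLoop ps links

def best_epub_link (links : List (String × String)) : String :=
  match pvOuterLoop ["epub.images", "epub.noimages", "epub"] links with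
  | some u => u
  | none =>
    match pvScanKey ".epub" links with
    | some u => u
    | none => ""          -- Python raises ValueError here; excluded by Pre_best_epub_link

-- ===== PORT B =====
-- '_rank(key, prefs)': index of first preference contained in key, len(prefs) if none
def pvRankAux (k : String) : List String → Nat → Nat
  | [], i => i
  | p :: ps, i => if PySem.Str.isIn p k then i else pvRankAux k ps (i + 1)

-- the single pass, state (best_rank, best_url)
def pvLoopB (prefs : List String) : List (String × String) → Nat → Option String → Nat × Option String
  | [], b, u => (b, u)
  | (k, url) :: t, b, u =>
    if pvRankAux k prefs 0 < b then pvLoopB prefs t (pvRankAux k prefs 0) (some url)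
    else pvLoopB prefs t b u

def best_epub_link_alt (links : List (String × String)) : String :=
  match (pvLoopB ["epub.images", "epub.noimages", "epub"] links 3 none).2 with
  | some u => u
  | none => ""            -- Python raises ValueError here; excluded by Pre_best_epub_link

-- ===== PRECONDITION & SPEC =====
-- Pre_ excludes exactly the inputs where A raises ValueError: no key contains "epub"
-- (the '.epub' fallback is unreachable, since ".epub" in key implies "epub" in key).
def Pre_best_epub_link (links : List (String × String)) : Prop :=
  (links.any (fun p => PySem.Str.isIn "epub" p.1)) = true
instance (links : List (String × String)) : Decidable (Pre_best_epub_link links) := by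
  unfold Pre_best_epub_link; infer_instance

def pvWitness_best_epub_link : (List (String × String)) :=
  [("application/x+zip.epub.images", "https://example.org/1.epub")]

def Spec_best_epub_link (links : List (String × String)) (out : String) : Prop := out = best_epub_link_alt links
instance (links : List (String × String)) (out : String) : Decidable (Spec_best_epub_link links out) := by unfold Spec_best_epub_link; infer_instance

-- ===== CLAIM (what is proved, stated in full; the proofs are below) =====
def Claim_equal_best_epub_link : Prop := ∀ (links : List (String × String)), Dom_best_epub_link links → Pre_best_epub_link links → Spec_best_epub_link links (best_epub_link links)

-- ===== LEMMAS AND PROOFS =====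

-- proof-side: (minimal rank over links, url of the first key attaining it)
def pvBestOf : List (String × String) → Nat × Option String
  | [] => (3, none)
  | (k, u) :: t =>
    if pvRankAux k ["epub.images", "epub.noimages", "epub"] 0 < 3 ∧
       pvRankAux k ["epub.images", "epub.noimages", "epub"] 0 ≤ (pvBestOf t).1
    then (pvRankAux k ["epub.images", "epub.noimages", "epub"] 0, some u)
    else pvBestOf t

lemma pvRank_unfold (k : String) :
    pvRankAux k ["epub.images", "epub.noimages", "epub"] 0 =
      if PySem.Str.isIn "epub.images" k then 0
      else if PySem.Str.isIn "epub.noimages" k then 1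
      else if PySem.Str.isIn "epub" k then 2 else 3 := by
  cases h0 : PySem.Str.isIn "epub.images" k with
  | true => simp only [pvRankAux, h0, if_true]
  | false =>
    cases h1 : PySem.Str.isIn "epub.noimages" k with
    | true => simp only [pvRankAux, h0, h1]
    | false =>
      cases h2 : PySem.Str.isIn "epub" k with
      | true => simp only [pvRankAux, h0, h1, h2]
      | false => simp only [pvRankAux, h0, h1, h2]

lemma pvLoopB_eq (links : List (String × String)) :
    ∀ (b : Nat) (u : Option String), b ≤ 3 →
      pvLoopB ["epub.images", "epub.noimages", "epub"] links b u =
        if (pvBestOf links).1 < b then pvBestOf links else (b, u) := by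
  induction links with
  | nil =>
    intro b u hb
    have hnb : ¬ (3 : Nat) < b := by omega
    simp [pvLoopB, pvBestOf, hnb]
  | cons h t ih =>
    obtain ⟨k, url⟩ := h
    intro b u hb
    rcases hm : pvBestOf t with ⟨m1, mu⟩
    have ih' : ∀ (b : Nat) (u : Option String), b ≤ 3 →
        pvLoopB ["epub.images", "epub.noimages", "epub"] t b u =
          if m1 < b then (m1, mu) else (b, u) := by
      intro b u hb; rw [ih b u hb, hm]
    simp only [pvLoopB, pvBestOf, hm]
    set r := pvRankAux k ["epub.images", "epub.noimages", "epub"] 0 with hrdef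
    by_cases hrb : r < b
    · rw [if_pos hrb, ih' r (some url) (by omega)]
      by_cases hle : r ≤ m1
      · have h1 : ¬ m1 < r := by omega
        have h3 : r < 3 := by omega
        simp [h1, h3, hle, hrb]
      · have h1 : m1 < r := by omega
        have h2 : m1 < b := by omega
        simp [hle, h1, h2]
    · rw [if_neg hrb, ih' b u hb]
      by_cases hfront : r < 3 ∧ r ≤ m1
      · have h1 : ¬ m1 < b := by omega
        simp [hfront.1, hfront.2, hrb, h1]
      · simp [hfront]

lemma pvScanKey_p2_none_iff (links : List (String × String)) :
    pvScanKey "epub" links = none ↔ (links.any (fun p => PySem.Str.isIn "epub" p.1)) = false := by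
  induction links with
  | nil => simp [pvScanKey]
  | cons h t ih =>
    obtain ⟨k, u⟩ := h
    simp only [pvScanKey, List.any_cons]
    cases hk : PySem.Str.isIn "epub" k with
    | true => simp
    | false => simp [ih]

lemma pvBestOf_eq (links : List (String × String)) :
    pvBestOf links =
      match pvScanKey "epub.images" links with
      | some u => (0, some u)
      | none =>
        match pvScanKey "epub.noimages" links with
        | some u => (1, some u)
        | none =>
          match pvScanKey "epub" links with
          | some u => (2, some u)
          | none => (3, none) := by
  induction links with
  | nil => rfl
  | cons h t ih =>
    obtain ⟨k, u⟩ := h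
    cases h0 : PySem.Str.isIn "epub.images" k with
    | true =>
      simp only [pvBestOf, pvScanKey, pvRank_unfold, h0]
      simp
    | false =>
      cases h1 : PySem.Str.isIn "epub.noimages" k with
      | true =>
        simp only [pvBestOf, pvScanKey, pvRank_unfold, h0, h1, ih]
        cases hc0 : pvScanKey "epub.images" t with
        | some v => simp
        | none =>
          cases hc1 : pvScanKey "epub.noimages" t with
          | some v => simp
          | none =>
            cases hc2 : pvScanKey "epub" t with
            | some v => simp
            | none => simp
      | false =>
        cases h2 : PySem.Str.isIn "epub" k with
        | true =>
          simp only [pvBestOf, pvScanKey, pvRank_unfold, h0, h1, h2, ih]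
          cases hc0 : pvScanKey "epub.images" t with
          | some v => simp
          | none =>
            cases hc1 : pvScanKey "epub.noimages" t with
            | some v => simp
            | none =>
              cases hc2 : pvScanKey "epub" t with
              | some v => simp
              | none => simp
        | false =>
          simp only [pvBestOf, pvScanKey, pvRank_unfold, h0, h1, h2, ih]
          simp

-- ===== VERDICT (by name: the statement is the Claim_ definition above) =====
theorem best_epub_link_spec : Claim_equal_best_epub_link := by
  intro links _ hpre
  unfold Spec_best_epub_link best_epub_link best_epub_link_alt pvOuterLoop
  have hloop := pvLoopB_eq links 3 none (by omega)
  have hbest := pvBestOf_eq links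
  cases hc0 : pvScanKey "epub.images" links with
  | some v => simp [hloop, hbest, hc0]
  | none =>
    cases hc1 : pvScanKey "epub.noimages" links with
    | some v => simp [pvOuterLoop, hloop, hbest, hc0, hc1]
    | none =>
      cases hc2 : pvScanKey "epub" links with
      | some v => simp [pvOuterLoop, hloop, hbest, hc0, hc1, hc2]
      | none =>
        have hfalse := (pvScanKey_p2_none_iff links).mp hc2
        unfold Pre_best_epub_link at hpre
        rw [hfalse] at hpre
        simp at hpre
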